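-- pv_equiv track=rewrite | github.com/waili001/pm-ai | backend/features/auth/service/rbac_service.py | _match_path
-- ===== SOURCE A (Python) =====
-- def _match_path(pattern: str, actual: str) -> bool:
--     """
--     Match URL path with pattern.
--     Pattern can contain {param}.
--     """
--     if pattern == actual:
--         return True
--
--     # Convert pattern to regex
--     # Escape special chars except { }
--     regex = "^" + pattern.replace("{", "(?P<").replace("}", ">[^/]+)") + "$"
--     # Note: This is a simplistic conversion.
--     # Real implementation might need more robust router matching.
--     # Alternatively, we can rely on how we define permissions in config.
--     # If we define `/api/users/{id}`, we expect exact string match if we use Starlette routing?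
--     # No, actual request path is `/api/users/1`.
--
--     # Let's use simple regex replacement for {}
--
--     # Escape existing regex chars
--     # escaped = re.escape(pattern) # This escapes { } too.
--
--     # Manual regex:
--     # Split by /, match segments
--
--     p_parts = pattern.split('/')
--     a_parts = actual.split('/')
--
--     if len(p_parts) != len(a_parts):
--         return False
--
--     for p, a in zip(p_parts, a_parts):
--         if p.startswith('{') and p.endswith('}'):
--             continue # Matches anything
--         if p != a:
--             return False
--
--     return True
-- ===== SOURCE B (Python) =====
-- def _match_path(pattern: str, actual: str) -> bool:
--     """Single left-to-right scan over both strings with two cursors: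
--     compare segment by segment as they are discovered, never building
--     the full segment lists."""
--     i = j = 0
--     n, m = len(pattern), len(actual)
--     while True:
--         k = pattern.find('/', i)
--         h = actual.find('/', j)
--         pseg = pattern[i:] if k < 0 else pattern[i:k]
--         aseg = actual[j:] if h < 0 else actual[j:h]
--         if not (pseg.startswith('{') and pseg.endswith('}')) and pseg != aseg:
--             return False
--         if k < 0 or h < 0:
--             return k < 0 and h < 0
--         i, j = k + 1, h + 1
-- ===== Notes on version B (the rewrite author's own statement) =====
-- stated objective: alternative
-- what changed: Replaces A's split-both-strings-into-lists + length check + zip loop (plus a redundant exact-equality shortcut) by a single streaming scan with two cursors that extracts and compares one segment at a time and detects unequal segment counts when one string runs out of '/' before the other.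
import Mathlib
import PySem

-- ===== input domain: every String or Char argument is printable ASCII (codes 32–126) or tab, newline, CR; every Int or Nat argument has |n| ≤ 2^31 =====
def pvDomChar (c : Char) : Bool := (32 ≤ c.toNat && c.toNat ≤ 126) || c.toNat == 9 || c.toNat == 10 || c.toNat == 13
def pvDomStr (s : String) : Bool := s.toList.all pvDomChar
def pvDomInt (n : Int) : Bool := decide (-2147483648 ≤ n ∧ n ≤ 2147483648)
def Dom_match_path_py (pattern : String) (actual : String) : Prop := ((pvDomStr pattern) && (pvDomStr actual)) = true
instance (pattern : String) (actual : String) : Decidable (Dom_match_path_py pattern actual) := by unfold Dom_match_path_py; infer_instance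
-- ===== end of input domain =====

-- B replaces A's split-into-lists + length check + zip loop by a single streaming
-- two-cursor scan that compares one segment at a time (objective: alternative).

-- ===== PORT A =====
-- A's `for p, a in zip(p_parts, a_parts)` loop with continue / early return:
def pvMatchLoopA : List (List Char × List Char) → Bool
  | [] => true
  | (p, a) :: rest =>
    if PySem.Chars.startswith p ['{'] = true ∧ PySem.Chars.endswith p ['}'] = true then
      pvMatchLoopA rest
    else if p ≠ a then false
    else pvMatchLoopA rest

def match_path_py (pattern : String) (actual : String) : Bool :=
  if pattern == actual then true
  else
    -- (A's unused `regex` string is dead code and is not ported)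
    let p_parts := PySem.Chars.splitOn pattern.toList ['/']
    let a_parts := PySem.Chars.splitOn actual.toList ['/']
    if p_parts.length ≠ a_parts.length then false
    else pvMatchLoopA (p_parts.zip a_parts)

-- ===== PORT B =====
-- termination helper for the port's recursion (cited in decreasing_by)
theorem pvTW_le (p : List Char) : (p.takeWhile (· ≠ '/')).length ≤ p.length := by
  induction p with
  | nil => simp
  | cons c r ih =>
    by_cases h : c = '/'
    · simp [List.takeWhile, h]
    · simpa [List.takeWhile, h] using ih

-- B's while loop with cursors i, j: the cursors become the remaining suffixes p, a;
-- `pattern.find('/', i)` and the slice up to it become `takeWhile (· ≠ '/')` on the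
-- suffix (exact for the single character '/'); `k < 0` ↔ the segment is the whole
-- remaining suffix (pseg.length = p.length); `i = k + 1` drops the segment and its '/'.
def pvAltGo (p a : List Char) : Bool :=
  let pseg := p.takeWhile (· ≠ '/')
  let aseg := a.takeWhile (· ≠ '/')
  if ¬(PySem.Chars.startswith pseg ['{'] = true ∧ PySem.Chars.endswith pseg ['}'] = true)
      ∧ pseg ≠ aseg then false
  else if h : pseg.length = p.length ∨ aseg.length = a.length then
    decide (pseg.length = p.length) == decide (aseg.length = a.length)
  else pvAltGo (p.drop (pseg.length + 1)) (a.drop (aseg.length + 1))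
termination_by p.length
decreasing_by
  have h1 : pseg.length ≤ p.length := pvTW_le p
  have h2 : ¬(pseg.length = p.length) := by tauto
  simp only [List.length_drop]
  omega

def match_path_py_alt (pattern : String) (actual : String) : Bool :=
  pvAltGo pattern.toList actual.toList

-- ===== PRECONDITION & SPEC =====
def Spec_match_path_py (pattern : String) (actual : String) (out : Bool) : Prop := out = match_path_py_alt pattern actual
instance (pattern : String) (actual : String) (out : Bool) : Decidable (Spec_match_path_py pattern actual out) := by unfold Spec_match_path_py; infer_instance

-- ===== CLAIM (what is proved, stated in full; the proofs are below) =====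
def Claim_equal_match_path_py : Prop := ∀ (pattern : String) (actual : String), Dom_match_path_py pattern actual → Spec_match_path_py pattern actual (match_path_py pattern actual)

-- ===== LEMMAS AND PROOFS =====

-- proof-side structural model of Python's split on '/'
def pvSplit : List Char → List (List Char)
  | [] => [[]]
  | c :: rest => if c = '/' then [] :: pvSplit rest else (pvSplit rest).modifyHead (c :: ·)

theorem pvSplit_ne_nil (cs : List Char) : pvSplit cs ≠ [] := by
  induction cs with
  | nil => simp [pvSplit]
  | cons c rest ih =>
    simp only [pvSplit]
    split_ifs
    · simp
    · cases h : pvSplit rest with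
      | nil => exact absurd h ih
      | cons x t => simp

-- PySem's fuel/accumulator splitter equals the structural model
theorem pv_go_eq : ∀ (fuel : Nat) (l cur : List Char) (acc : List (List Char)),
    l.length < fuel →
    PySem.Chars.splitOn.go ['/'] fuel l cur acc
      = acc.reverse ++ (pvSplit l).modifyHead (cur.reverse ++ ·) := by
  intro fuel
  induction fuel with
  | zero => intro l cur acc h; omega
  | succ n ih =>
    intro l cur acc h
    cases l with
    | nil =>
      simp [PySem.Chars.splitOn.go, pvSplit]
    | cons c rest =>
      by_cases hc : c = '/'
      · subst hc
        rw [show PySem.Chars.splitOn.go ['/'] (n+1) ('/' :: rest) cur acc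
              = PySem.Chars.splitOn.go ['/'] n (List.drop 1 ('/' :: rest)) [] (cur.reverse :: acc) by
            simp [PySem.Chars.splitOn.go, List.isPrefixOf]]
        rw [ih _ _ _ (by simpa using Nat.lt_of_succ_lt_succ h)]
        cases hs : pvSplit rest with
        | nil => exact absurd hs (pvSplit_ne_nil rest)
        | cons x t => simp [pvSplit, hs]
      · rw [show PySem.Chars.splitOn.go ['/'] (n+1) (c :: rest) cur acc
              = PySem.Chars.splitOn.go ['/'] n rest (c :: cur) acc by
            simp [PySem.Chars.splitOn.go, List.isPrefixOf]
            intro h'; exact absurd h'.symm hc]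
        rw [ih _ _ _ (by simpa using Nat.lt_of_succ_lt_succ h)]
        cases hs : pvSplit rest with
        | nil => exact absurd hs (pvSplit_ne_nil rest)
        | cons x t => simp [pvSplit, hc, hs]

theorem pvSplitOn_eq (cs : List Char) : PySem.Chars.splitOn cs ['/'] = pvSplit cs := by
  have h := pv_go_eq (cs.length + 1) cs [] [] (by omega)
  simp only [PySem.Chars.splitOn] at *
  rw [h]
  cases hs : pvSplit cs with
  | nil => exact absurd hs (pvSplit_ne_nil cs)
  | cons x t => simp

-- segment-at-a-time view of pvSplit: head segment, then the split of the rest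
theorem pvSplit_seg (cs : List Char) :
    pvSplit cs =
      (cs.takeWhile (· ≠ '/')) ::
        (if (cs.takeWhile (· ≠ '/')).length = cs.length then []
         else pvSplit (cs.drop ((cs.takeWhile (· ≠ '/')).length + 1))) := by
  induction cs with
  | nil => simp [pvSplit]
  | cons c rest ih =>
    by_cases hc : c = '/'
    · subst hc
      simp [pvSplit, List.takeWhile]
    · have ht : (c :: rest).takeWhile (· ≠ '/') = c :: rest.takeWhile (· ≠ '/') := by
        simp [List.takeWhile, hc]
      simp only [pvSplit, if_neg hc, ht]
      rw [ih]
      simp only [List.modifyHead, List.length_cons, Nat.add_right_cancel_iff,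
        List.drop_succ_cons]

-- B returns true on two equal strings (covers A's `pattern == actual` shortcut)
theorem pvAltGo_refl (n : Nat) : ∀ l : List Char, l.length ≤ n → pvAltGo l l = true := by
  induction n with
  | zero =>
    intro l h
    have hl : l = [] := by cases l <;> simp_all
    subst hl
    rw [pvAltGo]
    simp
  | succ n ih =>
    intro l h
    rw [pvAltGo]
    split_ifs with h1 h2
    · exact absurd rfl h1.2
    · simp
    · apply ih
      have h1 := pvTW_le l
      have h2' : ¬((l.takeWhile (· ≠ '/')).length = l.length) := by tauto
      simp only [List.length_drop]
      omega

-- A's split/length-check/zip-loop pipeline equals B's streaming scan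
theorem pv_main : ∀ (n : Nat) (p a : List Char), p.length < n →
    (if (pvSplit p).length ≠ (pvSplit a).length then false
     else pvMatchLoopA ((pvSplit p).zip (pvSplit a))) = pvAltGo p a := by
  intro n
  induction n with
  | zero => intro p a h; omega
  | succ n ih =>
    intro p a hp
    have hsp := pvSplit_seg p
    have hsa := pvSplit_seg a
    rw [pvAltGo]
    by_cases hpe : (p.takeWhile (· ≠ '/')).length = p.length
      <;> by_cases hae : (a.takeWhile (· ≠ '/')).length = a.length
    · -- both final segments
      rw [if_pos hpe] at hsp; rw [if_pos hae] at hsa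
      rw [hsp, hsa]
      simp only [List.length_cons, List.length_nil, ne_eq, not_true_eq_false, List.zip_cons_cons, List.zip_nil_right]
      rw [dif_pos (Or.inl hpe)]
      simp only [pvMatchLoopA]
      split_ifs with h1 h2 <;> simp_all
    · -- p ends, a continues
      rw [if_pos hpe] at hsp; rw [if_neg hae] at hsa
      obtain ⟨x, t, hq⟩ : ∃ x t, pvSplit (a.drop ((a.takeWhile (· ≠ '/')).length + 1)) = x :: t := by
        cases hq : pvSplit (a.drop ((a.takeWhile (· ≠ '/')).length + 1)) with
        | nil => exact absurd hq (pvSplit_ne_nil _)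
        | cons x t => exact ⟨x, t, rfl⟩
      rw [hq] at hsa
      rw [hsp, hsa]
      simp only [List.length_cons, List.length_nil, ne_eq, Nat.add_right_cancel_iff]
      rw [if_pos (by omega)]
      rw [dif_pos (Or.inl hpe)]
      split_ifs with h1
      · rfl
      · simp only [ne_eq, decide_not] at hpe hae
        simp [hpe, hae]
    · -- p continues, a ends
      rw [if_neg hpe] at hsp; rw [if_pos hae] at hsa
      obtain ⟨x, t, hq⟩ : ∃ x t, pvSplit (p.drop ((p.takeWhile (· ≠ '/')).length + 1)) = x :: t := by
        cases hq : pvSplit (p.drop ((p.takeWhile (· ≠ '/')).length + 1)) with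
        | nil => exact absurd hq (pvSplit_ne_nil _)
        | cons x t => exact ⟨x, t, rfl⟩
      rw [hq] at hsp
      rw [hsp, hsa]
      simp only [List.length_cons, List.length_nil, ne_eq, Nat.add_right_cancel_iff]
      rw [if_pos (by omega)]
      rw [dif_pos (Or.inr hae)]
      split_ifs with h1
      · rfl
      · simp only [ne_eq, decide_not] at hpe hae
        simp [hpe, hae]
    · -- both continue: recurse
      rw [if_neg hpe] at hsp; rw [if_neg hae] at hsa
      rw [hsp, hsa]
      have hlt : (p.drop ((p.takeWhile (· ≠ '/')).length + 1)).length < n := by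
        have h1 := pvTW_le p
        simp only [List.length_drop]
        omega
      have ihv := ih (p.drop ((p.takeWhile (· ≠ '/')).length + 1)) (a.drop ((a.takeWhile (· ≠ '/')).length + 1)) hlt
      rw [dif_neg (by tauto : ¬ ((p.takeWhile (· ≠ '/')).length = p.length ∨ (a.takeWhile (· ≠ '/')).length = a.length))]
      simp only [List.length_cons, ne_eq, Nat.add_right_cancel_iff, List.zip_cons_cons]
      by_cases hlen : (pvSplit (p.drop ((p.takeWhile (· ≠ '/')).length + 1))).length = (pvSplit (a.drop ((a.takeWhile (· ≠ '/')).length + 1))).length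
      · rw [if_neg (by simpa using hlen)]
        simp only [ne_eq, hlen, not_true_eq_false, if_neg (by simp : ¬ False)] at ihv
        simp only [pvMatchLoopA]
        split_ifs with h1 h2 <;> simp_all
      · rw [if_pos (by simpa using hlen)]
        simp only [ne_eq, hlen, not_false_eq_true, if_pos trivial] at ihv
        split_ifs with h1 <;> simp_all

-- ===== VERDICT (by name: the statement is the Claim_ definition above) =====
theorem match_path_py_spec : Claim_equal_match_path_py := by
  intro pattern actual _
  unfold Spec_match_path_py match_path_py match_path_py_alt
  by_cases heq : pattern == actual
  · rw [if_pos heq]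
    have h : pattern = actual := by simpa using heq
    subst h
    exact (pvAltGo_refl pattern.toList.length pattern.toList le_rfl).symm
  · rw [if_neg heq]
    simp only [pvSplitOn_eq]
    exact pv_main (pattern.toList.length + 1) pattern.toList actual.toList (by omega)
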